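-- pv_equiv track=rewrite | github.com/OZmasterAI/Torus-Framework | hooks/shared/search_helpers.py | generate_fuzzy_variants
-- ===== SOURCE A (Python) =====
-- def generate_fuzzy_variants(term, max_distance=1):
--     """Generate spelling variants within edit distance for fuzzy matching."""
--     if len(term) <= 2:
--         return [term]
--
--     variants = {term}
--     alphabet = "abcdefghijklmnopqrstuvwxyz0123456789_"
--
--     for i in range(len(term)):
--         variants.add(term[:i] + term[i + 1 :])
--
--     for i in range(len(term)):
--         for c in alphabet:
--             if c != term[i]:
--                 variants.add(term[:i] + c + term[i + 1 :])
--
--     for i in range(len(term) - 1):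
--         variants.add(term[:i] + term[i + 1] + term[i] + term[i + 2 :])
--
--     return list(variants)
-- ===== SOURCE B (Python) =====
-- ALPHABET = "abcdefghijklmnopqrstuvwxyz0123456789_"
--
--
-- def _edits(s):
--     """Divide-and-conquer: return (deletions, substitutions, transpositions) of s,
--     each phase listed in ascending position order.
--
--     Split s in half; an edit lies wholly in the left half, wholly in the right
--     half, or is the transposition straddling the boundary.
--     """
--     if len(s) <= 1:
--         if not s:
--             return [], [], []
--         return [""], [c for c in ALPHABET if c != s], []
--     m = len(s) // 2
--     L, R = s[:m], s[m:]
--     dl, sl, tl = _edits(L)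
--     dr, sr, tr = _edits(R)
--     dels = [x + R for x in dl] + [L + x for x in dr]
--     subs = [x + R for x in sl] + [L + x for x in sr]
--     mid = L[:-1] + R[0] + L[-1] + R[1:]
--     transps = [x + R for x in tl] + [mid] + [L + x for x in tr]
--     return dels, subs, transps
--
--
-- def generate_fuzzy_variants(term, max_distance=1):
--     """Generate spelling variants within edit distance for fuzzy matching."""
--     if len(term) <= 2:
--         return [term]
--     d, r, t = _edits(term)
--     return list({term}.union(d, r, t))
-- ===== Notes on version B (the rewrite author's own statement) =====
-- stated objective: alternative
-- what changed: Replaces A's three index-keyed loops over range(len(term)) by a divide-and-conquer recursion: split the term in half, recursively compute each half's deletions/substitutions/transpositions, append the untouched half to each variant, and add the one transposition straddling the boundary.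
import Mathlib
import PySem

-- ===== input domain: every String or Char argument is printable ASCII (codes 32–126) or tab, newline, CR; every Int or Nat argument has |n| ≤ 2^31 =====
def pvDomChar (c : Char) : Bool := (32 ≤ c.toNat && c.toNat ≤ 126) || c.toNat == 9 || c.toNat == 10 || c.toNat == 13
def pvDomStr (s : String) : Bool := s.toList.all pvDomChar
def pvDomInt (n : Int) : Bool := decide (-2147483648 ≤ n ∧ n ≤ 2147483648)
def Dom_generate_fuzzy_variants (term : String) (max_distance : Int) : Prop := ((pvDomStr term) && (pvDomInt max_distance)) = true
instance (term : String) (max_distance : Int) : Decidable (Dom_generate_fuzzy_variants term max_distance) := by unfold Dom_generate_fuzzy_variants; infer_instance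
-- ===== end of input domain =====

-- B replaces A's three index-keyed loops by a divide-and-conquer recursion: split the term in half, recursively edit each half, and stitch in the boundary transposition — alternative algorithm, same result.


-- ===== PORT A =====
-- len(term) on the ASCII domain is term.toList.length; string concatenation/slicing/indexing is done on
-- List Char with the PySem primitives (Lean's own String ops are opaque) and repacked with String.ofList.
def generate_fuzzy_variants (term : String) (max_distance : Int) : List String :=
  let t := term.toList
  if t.length ≤ 2 then [term]
  else
    let variants : PySem.Set String := PySem.Set.ofList [term]
    let alphabet := "abcdefghijklmnopqrstuvwxyz0123456789_".toList
    let variants := (PySem.List.pyRange 0 (t.length : Int)).foldl (fun s i =>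
        PySem.Set.add s (String.ofList (PySem.List.slice t none (some i) ++
          PySem.List.slice t (some (i + 1)) none))) variants
    let variants := (PySem.List.pyRange 0 (t.length : Int)).foldl (fun s i =>
        alphabet.foldl (fun s c =>
          if c != PySem.List.pyGetD t i ' ' then
            PySem.Set.add s (String.ofList (PySem.List.slice t none (some i) ++
              c :: PySem.List.slice t (some (i + 1)) none))
          else s) s) variants
    let variants := (PySem.List.pyRange 0 ((t.length : Int) - 1)).foldl (fun s i =>
        PySem.Set.add s (String.ofList (PySem.List.slice t none (some i) ++
          PySem.List.pyGetD t (i + 1) ' ' :: PySem.List.pyGetD t i ' ' ::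
          PySem.List.slice t (some (i + 2)) none))) variants
    variants

-- ===== PORT B =====
-- Source B's divide-and-conquer helper _edits: split s in half, recurse on both halves, append the
-- untouched half to each variant, and add the transposition straddling the boundary;
-- strings are List Char here (s[:-1] = dropLast, s[0] = headD, s[-1] = getLastD, s[1:] = tail).
def pvEditsB (alphabet : List Char) (s : List Char) :
    List (List Char) × List (List Char) × List (List Char) :=
  if _hs : s.length ≤ 1 then
    match s with
    | [] => ([], [], [])
    | c0 :: _ => ([[]], (alphabet.filter (fun c => c != c0)).map (fun c => [c]), [])
  else
    let m := s.length / 2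
    let L := s.take m
    let R := s.drop m
    let el := pvEditsB alphabet L
    let er := pvEditsB alphabet R
    (el.1.map (fun x => x ++ R) ++ er.1.map (fun x => L ++ x),
     el.2.1.map (fun x => x ++ R) ++ er.2.1.map (fun x => L ++ x),
     el.2.2.map (fun x => x ++ R) ++
       (L.dropLast ++ R.headD ' ' :: L.getLastD ' ' :: R.tail) ::
       er.2.2.map (fun x => L ++ x))
termination_by s.length
decreasing_by
  · simp only [List.length_take]; omega
  · simp only [List.length_drop]; omega

def generate_fuzzy_variants_alt (term : String) (max_distance : Int) : List String :=
  let t := term.toList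
  if t.length ≤ 2 then [term]
  else
    let alphabet := "abcdefghijklmnopqrstuvwxyz0123456789_".toList
    let e := pvEditsB alphabet t
    PySem.Set.union (PySem.Set.union (PySem.Set.union (PySem.Set.ofList [term])
      (e.1.map String.ofList)) (e.2.1.map String.ofList)) (e.2.2.map String.ofList)

-- ===== PRECONDITION & SPEC =====
def Spec_generate_fuzzy_variants (term : String) (max_distance : Int) (out : List String) : Prop := out = generate_fuzzy_variants_alt term max_distance
instance (term : String) (max_distance : Int) (out : List String) : Decidable (Spec_generate_fuzzy_variants term max_distance out) := by unfold Spec_generate_fuzzy_variants; infer_instance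

-- ===== CLAIM (what is proved, stated in full; the proofs are below) =====
def Claim_equal_generate_fuzzy_variants : Prop := ∀ (term : String) (max_distance : Int), Dom_generate_fuzzy_variants term max_distance → Spec_generate_fuzzy_variants term max_distance (generate_fuzzy_variants term max_distance)

-- ===== LEMMAS AND PROOFS =====

-- a loop 'for x in l: s.add(f(x))' is Set.update with the mapped list
theorem pv_foldl_add_map {α β : Type} [BEq α] (l : List β) (f : β → α) (s : PySem.Set α) :
    l.foldl (fun s x => PySem.Set.add s (f x)) s = PySem.Set.update s (l.map f) := by
  induction l generalizing s with
  | nil => rfl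
  | cons a l ih => simp [List.foldl_cons, PySem.Set.update_cons, ih]

-- a guarded add-loop is Set.update with the filtered mapped list
theorem pv_foldl_add_if {α β : Type} [BEq α] (p : β → Bool) (f : β → α) (l : List β)
    (s : PySem.Set α) :
    l.foldl (fun s x => if p x then PySem.Set.add s (f x) else s) s
      = PySem.Set.update s ((l.filter p).map f) := by
  induction l generalizing s with
  | nil => rfl
  | cons a l ih =>
    by_cases h : p a = true
    · simp [List.foldl_cons, h, ih, PySem.Set.update_cons]
    · simp [List.foldl_cons, h, ih]

-- nested loops whose bodies each perform a Set.update flatten to one update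
theorem pv_foldl_update {α β : Type} [BEq α] (l : List β) (g : β → List α) (s : PySem.Set α) :
    l.foldl (fun s x => PySem.Set.update s (g x)) s = PySem.Set.update s (l.flatMap g) := by
  induction l generalizing s with
  | nil => simp [PySem.Set.update]
  | cons a l ih => simp [List.foldl_cons, ih, List.flatMap_cons, PySem.Set.update_append]

theorem pv_foldl_pyRange {σ : Type} (m : ℕ) (g : σ → Int → σ) (s : σ) :
    (PySem.List.pyRange 0 (m : Int)).foldl g s
      = (List.range m).foldl (fun s k => g s ((k : ℕ) : Int)) s := by
  rw [PySem.List.pyRange_one, List.foldl_map]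
  simp

-- joining a suffix of the left half of a split back onto the right half
theorem pv_drop_take_drop (t : List Char) (m j : ℕ) (hj : j ≤ m) :
    (t.take m).drop j ++ t.drop m = t.drop j := by
  rw [List.drop_take,
    show t.drop m = (t.drop j).drop (m - j) by rw [List.drop_drop]; congr 1; omega]
  exact List.take_append_drop _ _

theorem pv_range_split (n m : ℕ) (h : m ≤ n) :
    List.range n = List.range m ++ (List.range (n - m)).map (m + ·) := by
  rw [← List.range_add]; congr 1; omega

-- the deletions of a split recombine to the deletions of the whole string
theorem pv_split_dels (t : List Char) (m : ℕ) (hm : m ≤ t.length) :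
    ((List.range m).map (fun k => (t.take m).take k ++ (t.take m).drop (k + 1))).map
        (fun x => x ++ t.drop m) ++
      ((List.range (t.length - m)).map (fun k =>
        (t.drop m).take k ++ (t.drop m).drop (k + 1))).map (fun x => t.take m ++ x)
    = (List.range t.length).map (fun k => t.take k ++ t.drop (k + 1)) := by
  rw [pv_range_split t.length m hm, List.map_append, List.map_map, List.map_map, List.map_map]
  congr 1
  · apply List.map_congr_left
    intro k hk
    rw [List.mem_range] at hk
    simp only [Function.comp_def, List.append_assoc, List.take_take,
      Nat.min_eq_left hk.le, pv_drop_take_drop t m (k + 1) (by omega)]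
  · apply List.map_congr_left
    intro k _
    simp only [Function.comp_def]
    rw [← List.append_assoc, ← List.take_add, List.drop_drop,
      show m + (k + 1) = m + k + 1 by omega]

-- the substitutions of a split recombine to the substitutions of the whole string
theorem pv_split_subs (A t : List Char) (m : ℕ) (hm : m ≤ t.length) :
    ((List.range m).flatMap (fun k =>
        (A.filter (fun c => c != (t.take m).getD k ' ')).map (fun c =>
          (t.take m).take k ++ c :: (t.take m).drop (k + 1)))).map (fun x => x ++ t.drop m) ++
      ((List.range (t.length - m)).flatMap (fun k =>
        (A.filter (fun c => c != (t.drop m).getD k ' ')).map (fun c =>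
          (t.drop m).take k ++ c :: (t.drop m).drop (k + 1)))).map (fun x => t.take m ++ x)
    = (List.range t.length).flatMap (fun k =>
        (A.filter (fun c => c != t.getD k ' ')).map (fun c =>
          t.take k ++ c :: t.drop (k + 1))) := by
  rw [pv_range_split t.length m hm, List.flatMap_append, List.flatMap_map,
    List.map_flatMap, List.map_flatMap]
  congr 1
  · apply List.flatMap_congr
    intro k hk
    rw [List.mem_range] at hk
    rw [List.map_map]
    rw [show (t.take m).getD k ' ' = t.getD k ' ' by
      rw [List.getD_eq_getElem?_getD, List.getD_eq_getElem?_getD, List.getElem?_take_of_lt hk]]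
    apply List.map_congr_left
    intro c _
    simp only [Function.comp_def, List.append_assoc, List.cons_append, List.take_take,
      Nat.min_eq_left hk.le, pv_drop_take_drop t m (k + 1) (by omega)]
  · apply List.flatMap_congr
    intro k _
    rw [List.map_map]
    rw [show (t.drop m).getD k ' ' = t.getD (m + k) ' ' by
      rw [List.getD_eq_getElem?_getD, List.getD_eq_getElem?_getD, List.getElem?_drop]]
    apply List.map_congr_left
    intro c _
    simp only [Function.comp_def, List.cons_append]
    rw [← List.append_assoc, ← List.take_add, List.drop_drop,
      show m + (k + 1) = m + k + 1 by omega]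

-- the transpositions of a split, plus the boundary transposition, recombine likewise
theorem pv_split_transps (t : List Char) (m : ℕ) (hm1 : 1 ≤ m) (hm : m < t.length) :
    ((List.range (m - 1)).map (fun k =>
        (t.take m).take k ++ (t.take m).getD (k + 1) ' ' :: (t.take m).getD k ' ' ::
          (t.take m).drop (k + 2))).map (fun x => x ++ t.drop m) ++
      ((t.take m).dropLast ++ (t.drop m).headD ' ' :: (t.take m).getLastD ' ' ::
        (t.drop m).tail) ::
      ((List.range (t.length - m - 1)).map (fun k =>
        (t.drop m).take k ++ (t.drop m).getD (k + 1) ' ' :: (t.drop m).getD k ' ' ::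
          (t.drop m).drop (k + 2))).map (fun x => t.take m ++ x)
    = (List.range (t.length - 1)).map (fun k =>
        t.take k ++ t.getD (k + 1) ' ' :: t.getD k ' ' :: t.drop (k + 2)) := by
  have hgetD : ∀ (j : ℕ), j < m → (t.take m).getD j ' ' = t.getD j ' ' := by
    intro j hj
    rw [List.getD_eq_getElem?_getD, List.getD_eq_getElem?_getD, List.getElem?_take_of_lt hj]
  have hgetDr : ∀ (j : ℕ), (t.drop m).getD j ' ' = t.getD (m + j) ' ' := by
    intro j
    rw [List.getD_eq_getElem?_getD, List.getD_eq_getElem?_getD, List.getElem?_drop]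
  rw [pv_range_split (t.length - 1) (m - 1) (by omega),
    show t.length - 1 - (m - 1) = (t.length - m - 1) + 1 by omega,
    List.range_succ_eq_map, List.map_append, List.map_map, List.map_map, List.map_cons,
    List.map_map]
  congr 1
  · apply List.map_congr_left
    intro k hk
    rw [List.mem_range] at hk
    simp only [Function.comp_def, List.append_assoc, List.cons_append,
      hgetD k (by omega), hgetD (k + 1) (by omega), List.take_take,
      Nat.min_eq_left (by omega : k ≤ m), pv_drop_take_drop t m (k + 2) (by omega)]
  · congr 1
    · -- the boundary transposition is the whole string's transposition at m - 1
      have hdrop : (t.drop m).headD ' ' = t.getD m ' ' := by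
        have : ∀ (l : List Char) (d : Char), l.headD d = l[0]?.getD d := by
          intro l d; cases l <;> rfl
        rw [this, List.getD_eq_getElem?_getD, List.getElem?_drop, Nat.add_zero]
      have hlast : (t.take m).getLastD ' ' = t.getD (m - 1) ' ' := by
        have hL : (t.take m).length = m := by rw [List.length_take]; omega
        rw [List.getLastD_eq_getLast?, List.getLast?_eq_getElem?, hL,
          List.getD_eq_getElem?_getD, List.getElem?_take_of_lt (by omega)]
      rw [hdrop, hlast, List.tail_drop, List.dropLast_eq_take, List.length_take]
      simp only [Nat.add_zero]
      rw [show min m t.length = m by omega, List.take_take,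
        show min (m - 1) m = m - 1 by omega,
        show m - 1 + 1 = m by omega, show m - 1 + 2 = m + 1 by omega]
    · rw [List.map_map]
      apply List.map_congr_left
      intro k _
      simp only [Function.comp_def, Nat.succ_eq_add_one, hgetDr, List.cons_append]
      rw [← List.append_assoc, ← List.take_add, List.drop_drop,
        show m - 1 + (k + 1) = m + k by omega,
        show m + (k + 1) = m + k + 1 by omega,
        show m + (k + 2) = m + k + 2 by omega]

-- Source B's divide-and-conquer edits computed in closed (position-indexed) form
theorem pv_editsB_eq (A : List Char) (t : List Char) :
    pvEditsB A t =
      ((List.range t.length).map (fun k => t.take k ++ t.drop (k + 1)),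
       (List.range t.length).flatMap (fun k =>
         (A.filter (fun c => c != t.getD k ' ')).map (fun c => t.take k ++ c :: t.drop (k + 1))),
       (List.range (t.length - 1)).map (fun k =>
         t.take k ++ t.getD (k + 1) ' ' :: t.getD k ' ' :: t.drop (k + 2))) := by
  suffices H : ∀ (n : ℕ) (t : List Char), t.length = n → pvEditsB A t =
      ((List.range t.length).map (fun k => t.take k ++ t.drop (k + 1)),
       (List.range t.length).flatMap (fun k =>
         (A.filter (fun c => c != t.getD k ' ')).map (fun c => t.take k ++ c :: t.drop (k + 1))),
       (List.range (t.length - 1)).map (fun k =>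
         t.take k ++ t.getD (k + 1) ' ' :: t.getD k ' ' :: t.drop (k + 2))) from
    H t.length t rfl
  intro n
  induction n using Nat.strong_induction_on with
  | _ n ih =>
    intro t ht
    rw [pvEditsB]
    by_cases h1 : t.length ≤ 1
    · rw [dif_pos h1]
      match t, h1 with
      | [], _ => rfl
      | [c0], _ => simp [List.range_one]
    · simp only [dif_neg h1]
      have hm1 : 1 ≤ t.length / 2 := by omega
      have hmn : t.length / 2 < t.length := by omega
      rw [ih (t.take (t.length / 2)).length
            (by rw [List.length_take]; omega) _ rfl,
          ih (t.drop (t.length / 2)).length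
            (by rw [List.length_drop]; omega) _ rfl]
      simp only [List.length_take, List.length_drop, Nat.min_eq_left hmn.le]
      refine Prod.ext ?_ (Prod.ext ?_ ?_)
      · exact pv_split_dels t (t.length / 2) hmn.le
      · exact pv_split_subs A t (t.length / 2) hmn.le
      · exact pv_split_transps t (t.length / 2) hm1 hmn

-- ===== VERDICT (by name: the statement is the Claim_ definition above) =====
theorem generate_fuzzy_variants_spec : Claim_equal_generate_fuzzy_variants := by
  intro term max_distance _hdom
  unfold Spec_generate_fuzzy_variants generate_fuzzy_variants generate_fuzzy_variants_alt
  set t := term.toList with ht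
  by_cases h2 : t.length ≤ 2
  · simp only [h2, if_true]
  · simp only [h2, if_false, PySem.Set.union, pv_editsB_eq]
    rw [show ((t.length : Int) - 1) = ((t.length - 1 : ℕ) : Int) by omega]
    rw [pv_foldl_pyRange, pv_foldl_pyRange, pv_foldl_pyRange]
    simp only [pv_foldl_add_if, pv_foldl_add_map, pv_foldl_update, List.map_map,
      List.map_flatMap]
    congr 1
    · congr 1
      · congr 1
        apply List.map_congr_left
        intro k _
        rw [show ((k : Int) + 1) = ((k + 1 : ℕ) : Int) by push_cast; ring,
          PySem.List.slice_from_natCast, PySem.List.slice_to_natCast]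
        rfl
      · rw [List.flatMap_def, List.flatMap_def]
        congr 1
        apply List.map_congr_left
        intro k _
        rw [show ((k : Int) + 1) = ((k + 1 : ℕ) : Int) by push_cast; ring,
          PySem.List.slice_from_natCast, PySem.List.slice_to_natCast,
          PySem.List.pyGetD_natCast]
        simp [Function.comp_def]
    · apply List.map_congr_left
      intro k _
      rw [show ((k : Int) + 1) = ((k + 1 : ℕ) : Int) by push_cast; ring,
        show ((k : Int) + 2) = ((k + 2 : ℕ) : Int) by push_cast; ring,
        PySem.List.slice_from_natCast, PySem.List.slice_to_natCast,
        PySem.List.pyGetD_natCast, PySem.List.pyGetD_natCast]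
      rfl
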